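-- pv_equiv track=rewrite | github.com/cblab/raumzeit | archive/reference-monolith/emergent_geometry_v9a_fast.py | shell_distribution_from_seed
-- ===== SOURCE A (Python) =====
-- from collections import deque, Counter
--
-- def shell_distribution_from_seed(neigh, seed):
--     q = deque([(seed, 0)])
--     dist = {seed: 0}
--
--     while q:
--         u, d = q.popleft()
--         for v in neigh[u]:
--             if v not in dist:
--                 dist[v] = d + 1
--                 q.append((v, d + 1))
--
--     cnt = Counter(dist.values())
--     max_r = max(cnt.keys()) if cnt else 0
--     shells = [cnt.get(r, 0) for r in range(max_r + 1)]
--     return shells, dist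
-- ===== SOURCE B (Python) =====
-- def shell_distribution_from_seed(neigh, seed):
--     # Level-synchronous BFS: shells are the frontier sizes; no Counter/max post-pass.
--     dist = {seed: 0}
--     frontier = [seed]
--     shells = []
--     level = 0
--     while frontier:
--         shells.append(len(frontier))
--         nxt = []
--         for u in frontier:
--             for v in neigh[u]:
--                 if v not in dist:
--                     dist[v] = level + 1
--                     nxt.append(v)
--         frontier = nxt
--         level += 1
--     return shells, dist
-- ===== Notes on version B (the rewrite author's own statement) =====
-- stated objective: simpler
-- what changed: Replaces the per-node deque BFS plus Counter/max/range post-pass with a level-synchronous BFS whose frontier sizes ARE the shells, so the Counter, the max over its keys and the range loop disappear.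
import Mathlib
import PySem

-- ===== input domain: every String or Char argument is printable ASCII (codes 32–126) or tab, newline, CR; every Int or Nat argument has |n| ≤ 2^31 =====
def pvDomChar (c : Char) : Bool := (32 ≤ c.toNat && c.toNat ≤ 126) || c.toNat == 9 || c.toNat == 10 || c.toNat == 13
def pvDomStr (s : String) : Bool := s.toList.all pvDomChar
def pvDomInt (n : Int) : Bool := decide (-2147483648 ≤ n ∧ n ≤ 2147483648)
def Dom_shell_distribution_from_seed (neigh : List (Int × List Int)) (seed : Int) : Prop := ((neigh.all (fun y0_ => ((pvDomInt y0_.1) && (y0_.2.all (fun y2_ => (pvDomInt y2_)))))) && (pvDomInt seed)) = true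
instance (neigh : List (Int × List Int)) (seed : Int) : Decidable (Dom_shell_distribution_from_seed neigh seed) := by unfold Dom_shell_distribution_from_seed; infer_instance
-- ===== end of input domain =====

-- B replaces the deque BFS + Counter/max/range post-pass by a level-synchronous BFS
-- whose per-level frontier sizes are the shells directly (objective: simpler).

-- shared helpers: neighbour lookup (Python dict access neigh[u]; total form, Pre_ excludes the KeyError)
def pvNbr (neigh : List (Int × List Int)) (u : Int) : List Int := (neigh.lookup u).getD []

-- A's inner loop body: state (dist, queue), append (v, d+1) for unseen v
def pvStepA (d : Int) (s : PySem.Dict Int Int × List (Int × Int)) (v : Int) :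
    PySem.Dict Int Int × List (Int × Int) :=
  if s.1.contains v then s else (s.1.insert v (d + 1), s.2 ++ [(v, d + 1)])

-- B's inner loop body: state (dist, next frontier), append v for unseen v
def pvStepB (level : Int) (s : PySem.Dict Int Int × List Int) (v : Int) :
    PySem.Dict Int Int × List Int :=
  if s.1.contains v then s else (s.1.insert v (level + 1), s.2 ++ [v])

-- termination measure: nodes of the neighbour multiset not yet in dist
def pvUnseen (neigh : List (Int × List Int)) (D : PySem.Dict Int Int) : Nat :=
  (neigh.flatMap (fun p => p.2)).countP (fun x => !(D.contains x))

theorem pv_countP_lt {p q : Int → Bool} (U : List Int) (v : Int) (hv : v ∈ U)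
    (hpv : p v = true) (hqv : q v = false) (himp : ∀ x, q x = true → p x = true) :
    U.countP q < U.countP p := by
  induction U with
  | nil => cases hv
  | cons a t ih =>
    rcases List.mem_cons.mp hv with rfl | ha
    · have h1 : t.countP q ≤ t.countP p := List.countP_mono_left (fun x hx h => himp x h)
      simp [List.countP_cons, hpv, hqv]; omega
    · have := ih ha
      by_cases hq : q a = true
      · simp [List.countP_cons, hq, himp a hq]; omega
      · simp only [List.countP_cons]
        rw [Bool.not_eq_true] at hq
        simp [hq]
        by_cases hp : p a = true <;> simp [hp] <;> omega

theorem pv_unseen_insert (neigh : List (Int × List Int)) (D : PySem.Dict Int Int)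
    (v x : Int) (hU : v ∈ neigh.flatMap (fun p => p.2)) (hc : D.contains v = false) :
    pvUnseen neigh (D.insert v x) < pvUnseen neigh D := by
  apply pv_countP_lt _ v hU
  · simp [hc]
  · simp [PySem.Dict.contains_insert]
  · intro y hy
    simp only [Bool.not_eq_true', PySem.Dict.contains_insert] at hy ⊢
    simp at hy; exact hy.2

theorem pv_nbr_sub (neigh : List (Int × List Int)) (u : Int) :
    ∀ v ∈ pvNbr neigh u, v ∈ neigh.flatMap (fun p => p.2) := by
  intro v hv
  unfold pvNbr at hv
  induction neigh with
  | nil => simp [List.lookup] at hv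
  | cons a t ih =>
    simp only [List.lookup] at hv
    by_cases h : u == a.1
    · simp [h] at hv
      exact List.mem_flatMap.mpr ⟨a, List.mem_cons_self, hv⟩
    · simp [h] at hv
      have := ih hv
      simp only [List.flatMap_cons]
      exact List.mem_append_right _ this

-- the fold over one node's neighbours cannot increase 2*unseen + |acc| (A's pair version)
theorem pv_decA (neigh : List (Int × List Int)) (d : Int) (vs : List Int)
    (hvs : ∀ v ∈ vs, v ∈ neigh.flatMap (fun p => p.2)) :
    ∀ (D : PySem.Dict Int Int) (Q : List (Int × Int)),
    2 * pvUnseen neigh (vs.foldl (pvStepA d) (D, Q)).1 + (vs.foldl (pvStepA d) (D, Q)).2.length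
      ≤ 2 * pvUnseen neigh D + Q.length := by
  induction vs with
  | nil => intro D Q; simp
  | cons v t ih =>
    intro D Q
    have hv := hvs v List.mem_cons_self
    have ht : ∀ v ∈ t, v ∈ neigh.flatMap (fun p => p.2) := fun w hw => hvs w (List.mem_cons_of_mem _ hw)
    simp only [List.foldl_cons]
    by_cases hc : D.contains v = true
    · simpa [pvStepA, hc] using ih ht D Q
    · rw [Bool.not_eq_true] at hc
      have h1 := ih ht (D.insert v (d + 1)) (Q ++ [(v, d + 1)])
      have h2 := pv_unseen_insert neigh D v (d + 1) hv (by simpa using hc)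
      simp only [pvStepA, hc, if_false, List.length_append, List.length_cons] at h1 ⊢
      simp at h1 ⊢
      omega

-- same for B's plain version
theorem pv_decB (neigh : List (Int × List Int)) (d : Int) (vs : List Int)
    (hvs : ∀ v ∈ vs, v ∈ neigh.flatMap (fun p => p.2)) :
    ∀ (D : PySem.Dict Int Int) (Q : List Int),
    2 * pvUnseen neigh (vs.foldl (pvStepB d) (D, Q)).1 + (vs.foldl (pvStepB d) (D, Q)).2.length
      ≤ 2 * pvUnseen neigh D + Q.length := by
  induction vs with
  | nil => intro D Q; simp
  | cons v t ih =>
    intro D Q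
    have hv := hvs v List.mem_cons_self
    have ht : ∀ v ∈ t, v ∈ neigh.flatMap (fun p => p.2) := fun w hw => hvs w (List.mem_cons_of_mem _ hw)
    simp only [List.foldl_cons]
    by_cases hc : D.contains v = true
    · simpa [pvStepB, hc] using ih ht D Q
    · rw [Bool.not_eq_true] at hc
      have h1 := ih ht (D.insert v (d + 1)) (Q ++ [v])
      have h2 := pv_unseen_insert neigh D v (d + 1) hv (by simpa using hc)
      simp only [pvStepB, hc, if_false, List.length_append, List.length_cons] at h1 ⊢
      simp at h1 ⊢
      omega

-- whole-level fold for B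
theorem pv_decLevel (neigh : List (Int × List Int)) (d : Int) (f : List Int) :
    ∀ (D : PySem.Dict Int Int) (Q : List Int),
    2 * pvUnseen neigh (f.foldl (fun s u => (pvNbr neigh u).foldl (pvStepB d) s) (D, Q)).1
      + (f.foldl (fun s u => (pvNbr neigh u).foldl (pvStepB d) s) (D, Q)).2.length
      ≤ 2 * pvUnseen neigh D + Q.length := by
  induction f with
  | nil => intro D Q; simp
  | cons u t ih =>
    intro D Q
    simp only [List.foldl_cons]
    have h1 := pv_decB neigh d (pvNbr neigh u) (pv_nbr_sub neigh u) D Q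
    calc 2 * pvUnseen neigh (t.foldl _ ((pvNbr neigh u).foldl (pvStepB d) (D, Q))).1
          + (t.foldl _ ((pvNbr neigh u).foldl (pvStepB d) (D, Q))).2.length
        ≤ 2 * pvUnseen neigh ((pvNbr neigh u).foldl (pvStepB d) (D, Q)).1
          + ((pvNbr neigh u).foldl (pvStepB d) (D, Q)).2.length := by
          have := ih ((pvNbr neigh u).foldl (pvStepB d) (D, Q)).1 ((pvNbr neigh u).foldl (pvStepB d) (D, Q)).2
          simpa using this
      _ ≤ 2 * pvUnseen neigh D + Q.length := h1

-- ===== PORT A =====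
-- the while-q loop of A: pop (u, d), scan neigh[u], append unseen at d+1
def pvBfsA (neigh : List (Int × List Int)) : List (Int × Int) → PySem.Dict Int Int → PySem.Dict Int Int
  | [], dist => dist
  | (u, d) :: rest, dist =>
    let s := (pvNbr neigh u).foldl (pvStepA d) (dist, rest)
    pvBfsA neigh s.2 s.1
termination_by q dist => 2 * pvUnseen neigh dist + q.length
decreasing_by
  have h := pv_decA neigh d (pvNbr neigh u) (pv_nbr_sub neigh u) dist rest
  simp only [List.length_cons]
  omega

def shell_distribution_from_seed (neigh : List (Int × List Int)) (seed : Int) :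
    List Int × (List (Int × Int)) :=
  let dist := pvBfsA neigh [(seed, 0)] ((PySem.Dict.empty).insert seed 0)
  let cnt := PySem.Dict.counter dist.values
  let max_r : Int := match PySem.List.max? cnt.keys (fun x => x) with
    | some m => m
    | none => 0
  let shells := (PySem.List.pyRange 0 (max_r + 1) 1).map (fun r => cnt.getD r 0)
  (shells, dist.items)

-- ===== PORT B =====
-- level-synchronous BFS: emit |frontier| as a shell, expand the whole level, recurse
def pvBfsB (neigh : List (Int × List Int)) : List Int → List Int → Int → PySem.Dict Int Int →
    List Int × PySem.Dict Int Int
  | [], shells, _, dist => (shells, dist)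
  | u :: t, shells, level, dist =>
    let s := (u :: t).foldl (fun s u => (pvNbr neigh u).foldl (pvStepB level) s) (dist, [])
    pvBfsB neigh s.2 (shells ++ [((u :: t).length : Int)]) (level + 1) s.1
termination_by frontier _ _ dist => 2 * pvUnseen neigh dist + frontier.length
decreasing_by
  have h1 := pv_decLevel neigh level (u :: t) dist []
  simp only [List.length_nil, List.length_cons] at h1 ⊢
  omega

def shell_distribution_from_seed_alt (neigh : List (Int × List Int)) (seed : Int) :
    List Int × (List (Int × Int)) :=
  let s := pvBfsB neigh [seed] [] 0 ((PySem.Dict.empty).insert seed 0)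
  (s.1, s.2.items)

-- ===== PRECONDITION & SPEC =====
-- the set of nodes the BFS can ever touch: close {seed} under neighbours-of-present-keys
-- (membership stabilises after at most |neigh| expansions, so |neigh|+1 rounds are exact)
def pvTouched (neigh : List (Int × List Int)) (seed : Int) : List Int :=
  (fun S => S.foldl (fun acc u => PySem.Set.update acc (pvNbr neigh u)) S)^[neigh.length + 1]
    (PySem.Set.ofList [seed])

-- Pre_: every node the BFS touches is a key of neigh — exactly the inputs where A's
-- dict accesses neigh[u] never raise KeyError
def Pre_shell_distribution_from_seed (neigh : List (Int × List Int)) (seed : Int) : Prop :=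
  ∀ v ∈ pvTouched neigh seed, v ∈ neigh.map Prod.fst
instance (neigh : List (Int × List Int)) (seed : Int) : Decidable (Pre_shell_distribution_from_seed neigh seed) := by unfold Pre_shell_distribution_from_seed; infer_instance

def pvWitness_shell_distribution_from_seed : (List (Int × List Int)) × Int :=
  ([(0, [1, 2]), (1, [0]), (2, [2])], 0)

def Spec_shell_distribution_from_seed (neigh : List (Int × List Int)) (seed : Int) (out : List Int × (List (Int × Int))) : Prop := out = shell_distribution_from_seed_alt neigh seed
instance (neigh : List (Int × List Int)) (seed : Int) (out : List Int × (List (Int × Int))) : Decidable (Spec_shell_distribution_from_seed neigh seed out) := by unfold Spec_shell_distribution_from_seed; infer_instance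

-- ===== CLAIM (what is proved, stated in full; the proofs are below) =====
def Claim_equal_shell_distribution_from_seed : Prop := ∀ (neigh : List (Int × List Int)) (seed : Int), Dom_shell_distribution_from_seed neigh seed → Pre_shell_distribution_from_seed neigh seed → Spec_shell_distribution_from_seed neigh seed (shell_distribution_from_seed neigh seed)

-- ===== LEMMAS AND PROOFS =====

-- intermediate traversal: A's queue split as (current level l₁ at depth d) ++ (next level l₂ at d+1)
def pvG (neigh : List (Int × List Int)) : List Int → List Int → Int → PySem.Dict Int Int → PySem.Dict Int Int
  | u :: t, l₂, d, dist =>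
    let s := (pvNbr neigh u).foldl (pvStepB d) (dist, l₂)
    pvG neigh t s.2 d s.1
  | [], l₂, d, dist =>
    if l₂ = [] then dist else pvG neigh l₂ [] (d + 1) dist
termination_by l₁ l₂ d dist =>
  (2 * pvUnseen neigh dist + l₁.length + l₂.length, if l₁ = [] then 1 else 0)
decreasing_by
  · have h := pv_decB neigh d (pvNbr neigh u) (pv_nbr_sub neigh u) dist l₂
    apply Prod.Lex.left
    simp only [List.length_cons]
    omega
  · apply Prod.Lex.right'
    · simp
    · simp_all

theorem pv_L0 (neigh : List (Int × List Int)) (d : Int) (vs : List Int) :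
    ∀ (D : PySem.Dict Int Int) (l₂ : List Int) (Q : List (Int × Int)),
    vs.foldl (pvStepA d) (D, Q ++ l₂.map (fun v => (v, d + 1)))
      = ((vs.foldl (pvStepB d) (D, l₂)).1,
         Q ++ (vs.foldl (pvStepB d) (D, l₂)).2.map (fun v => (v, d + 1))) := by
  induction vs with
  | nil => intro D l₂ Q; simp
  | cons v t ih =>
    intro D l₂ Q
    simp only [List.foldl_cons]
    by_cases hc : D.contains v = true
    · simp only [pvStepA, pvStepB, hc, if_true]
      exact ih D l₂ Q
    · rw [Bool.not_eq_true] at hc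
      simp only [pvStepA, pvStepB, hc, if_false]
      have := ih (D.insert v (d + 1)) (l₂ ++ [v]) Q
      simpa [List.append_assoc] using this

theorem pv_L1 (neigh : List (Int × List Int)) :
    ∀ (l₁ l₂ : List Int) (d : Int) (dist : PySem.Dict Int Int),
    pvBfsA neigh ((l₁.map (fun u => (u, d))) ++ (l₂.map (fun u => (u, d + 1)))) dist
      = pvG neigh l₁ l₂ d dist := by
  intro l₁ l₂ d dist
  fun_induction pvG neigh l₁ l₂ d dist with
  | case1 u t l₂ d dist s ih =>
    simp only [List.map_cons, List.cons_append]
    rw [pvBfsA]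
    have h0 := pv_L0 neigh d (pvNbr neigh u) dist l₂ (t.map (fun u => (u, d)))
    simp only [h0]
    exact ih
  | case2 d dist =>
    simp [pvBfsA, pvG]
  | case3 l₂ d dist h ih =>
    simpa using ih

theorem pv_L3 (neigh : List (Int × List Int)) (lvl : Int) :
    ∀ (f acc : List Int) (dist : PySem.Dict Int Int),
    pvG neigh f acc lvl dist
      = pvG neigh (f.foldl (fun s u => (pvNbr neigh u).foldl (pvStepB lvl) s) (dist, acc)).2 []
          (lvl + 1) (f.foldl (fun s u => (pvNbr neigh u).foldl (pvStepB lvl) s) (dist, acc)).1 := by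
  intro f
  induction f with
  | nil =>
    intro acc dist
    simp only [List.foldl_nil]
    by_cases h : acc = []
    · subst h
      rw [pvG, if_pos rfl, pvG, if_pos rfl]
    · rw [pvG, if_neg h]
  | cons u t ih =>
    intro acc dist
    rw [pvG]
    simp only [List.foldl_cons]
    exact ih _ _

theorem pv_L2 (neigh : List (Int × List Int)) :
    ∀ (f sh : List Int) (lvl : Int) (dist : PySem.Dict Int Int),
    (pvBfsB neigh f sh lvl dist).2 = pvG neigh f [] lvl dist := by
  intro f sh lvl dist
  fun_induction pvBfsB neigh f sh lvl dist with
  | case1 sh lvl dist =>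
    rw [pvG, if_pos rfl]
  | case2 u t sh lvl dist s ih =>
    rw [pv_L3]
    exact ih

def pvCountVal (D : PySem.Dict Int Int) (r : Int) : Nat := D.values.count r

theorem pv_L4i (neigh : List (Int × List Int)) (lvl : Int) (vs : List Int) :
    ∀ (D : PySem.Dict Int Int) (acc : List Int),
    ∃ new, (vs.foldl (pvStepB lvl) (D, acc)).2 = acc ++ new
      ∧ (vs.foldl (pvStepB lvl) (D, acc)).1.items = D.items ++ new.map (fun v => (v, lvl + 1)) := by
  induction vs with
  | nil => intro D acc; exact ⟨[], by simp⟩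
  | cons v t ih =>
    intro D acc
    simp only [List.foldl_cons]
    by_cases hc : D.contains v = true
    · simpa [pvStepB, hc] using ih D acc
    · rw [Bool.not_eq_true] at hc
      simp only [pvStepB, hc, Bool.false_eq_true, if_false]
      obtain ⟨new, h1, h2⟩ := ih (D.insert v (lvl + 1)) (acc ++ [v])
      refine ⟨v :: new, by simpa [List.append_assoc] using h1, ?_⟩
      rw [h2, PySem.Dict.items_insert_of_not_contains (h := hc)]
      simp

-- the level fold appends exactly the new frontier as fresh items with value lvl+1
theorem pv_L4 (neigh : List (Int × List Int)) (lvl : Int) :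
    ∀ (f : List Int) (D : PySem.Dict Int Int) (acc : List Int),
    ∃ new, (f.foldl (fun s u => (pvNbr neigh u).foldl (pvStepB lvl) s) (D, acc)).2 = acc ++ new
      ∧ (f.foldl (fun s u => (pvNbr neigh u).foldl (pvStepB lvl) s) (D, acc)).1.items
          = D.items ++ new.map (fun v => (v, lvl + 1)) := by
  intro f
  induction f with
  | nil => intro D acc; exact ⟨[], by simp⟩
  | cons u t ih =>
    intro D acc
    simp only [List.foldl_cons]
    obtain ⟨n1, h1, h2⟩ := pv_L4i neigh lvl (pvNbr neigh u) D acc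
    obtain ⟨n2, h3, h4⟩ := ih ((pvNbr neigh u).foldl (pvStepB lvl) (D, acc)).1
      ((pvNbr neigh u).foldl (pvStepB lvl) (D, acc)).2
    refine ⟨n1 ++ n2, ?_, ?_⟩
    · rw [h3, h1, List.append_assoc]
    · rw [h4, h2]
      simp [List.append_assoc]

-- main invariant: shells appended by pvBfsB are exactly the value-counts of the final dict
theorem pv_C (neigh : List (Int × List Int)) :
    ∀ (f sh : List Int) (lvl : Int) (dist : PySem.Dict Int Int),
    pvCountVal dist lvl = f.length →
    (∀ r : Int, lvl < r → pvCountVal dist r = 0) →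
    ∃ ts,
      (pvBfsB neigh f sh lvl dist).1 = sh ++ ts
      ∧ (∀ i : Nat, (pvCountVal (pvBfsB neigh f sh lvl dist).2 (lvl + i) : Int) = ts.getD i 0)
      ∧ (∀ r : Int, r < lvl → pvCountVal (pvBfsB neigh f sh lvl dist).2 r = pvCountVal dist r)
      ∧ (∀ x ∈ ts, 0 < x)
      ∧ (ts = [] ↔ f = []) := by
  intro f sh lvl dist
  fun_induction pvBfsB neigh f sh lvl dist with
  | case1 sh lvl dist =>
    intro h1 h2
    refine ⟨[], by simp, ?_, by simp, by simp, by simp⟩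
    intro i
    match i with
    | 0 => simpa using h1
    | Nat.succ n =>
      have := h2 (lvl + (n + 1)) (by omega)
      simp [this]
  | case2 u t sh lvl dist s ih =>
    intro h1 h2
    obtain ⟨new, hn1, hn2⟩ := pv_L4 neigh lvl (u :: t) dist []
    simp only [List.nil_append] at hn1
    have hvals : s.1.values = dist.values ++ List.replicate new.length (lvl + 1) := by
      show (s.1.items.map Prod.snd) = dist.items.map Prod.snd ++ List.replicate new.length (lvl + 1)
      rw [show s.1.items = dist.items ++ new.map (fun v => (v, lvl + 1)) from hn2]
      simp [Function.comp_def, List.map_const']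
    have hcnt : ∀ r : Int, pvCountVal s.1 r
        = pvCountVal dist r + (if r = lvl + 1 then new.length else 0) := by
      intro r
      unfold pvCountVal
      rw [hvals, List.count_append]
      congr 1
      by_cases hr : r = lvl + 1
      · subst hr; simp [List.count_replicate]
      · simp [List.count_replicate, hr]
        intro h; exact absurd h.symm hr
    have hyp1' : pvCountVal s.1 (lvl + 1) = s.2.length := by
      rw [hcnt, h2 (lvl + 1) (by omega), hn1]
      simp
    have hyp2' : ∀ r : Int, lvl + 1 < r → pvCountVal s.1 r = 0 := by
      intro r hr
      rw [hcnt, h2 r (by omega)]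
      simp
      omega
    obtain ⟨ts', c1, c2, c3, c4, c5⟩ := ih hyp1' hyp2'
    refine ⟨((u :: t).length : Int) :: ts', ?_, ?_, ?_, ?_, ?_⟩
    · rw [c1]; simp
    · intro i
      match i with
      | 0 =>
        have := c3 lvl (by omega)
        simp only [Nat.cast_zero, add_zero, this, List.getD_cons_zero]
        rw [hcnt, h1]
        simp
      | Nat.succ n =>
        have := c2 n
        rw [show lvl + ((n : Nat) + 1 : Nat) = lvl + 1 + (n : Nat) by push_cast; ring]
        simpa using this
    · intro r hr
      rw [c3 r (by omega), hcnt]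
      simp
      omega
    · intro x hx
      rcases List.mem_cons.mp hx with rfl | hx'
      · simp
      · exact c4 x hx'
    · simp

theorem pv_getD_range (ts : List Int) :
    (List.range ts.length).map (fun k => ts.getD k 0) = ts := by
  apply List.ext_getElem
  · simp
  · intro i h1 h2
    simp [List.getD_eq_getElem?_getD, List.getElem?_eq_getElem h2]

theorem pv_getD_mem (ts : List Int) (h : ts ≠ []) (n : Nat) (hn : n < ts.length) :
    ts.getD n 0 ∈ ts := by
  rw [List.getD_eq_getElem?_getD, List.getElem?_eq_getElem hn]
  exact List.getElem_mem hn

-- ===== VERDICT (by name: the statement is the Claim_ definition above) =====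
theorem shell_distribution_from_seed_spec : Claim_equal_shell_distribution_from_seed := by
  unfold Claim_equal_shell_distribution_from_seed
  intro neigh seed _ _
  unfold Spec_shell_distribution_from_seed
  unfold shell_distribution_from_seed shell_distribution_from_seed_alt
  set dist0 : PySem.Dict Int Int := (PySem.Dict.empty).insert seed 0 with hdist0
  -- the two traversals build the same dict
  have hdicts : pvBfsA neigh [(seed, 0)] dist0 = (pvBfsB neigh [seed] [] 0 dist0).2 := by
    have h := pv_L1 neigh [seed] [] 0 dist0
    simp only [List.map_cons, List.map_nil, List.append_nil] at h
    rw [pv_L2, ← h]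
  set P := pvBfsB neigh [seed] [] 0 dist0 with hP
  -- initial dict facts
  have hitems0 : dist0.items = [(seed, 0)] := by
    rw [hdist0, PySem.Dict.items_insert_of_not_contains (h := PySem.Dict.contains_empty seed)]
    rfl
  have hvals0 : dist0.values = [0] := by
    show dist0.items.map Prod.snd = [0]
    rw [hitems0]; simp
  have hyp1 : pvCountVal dist0 0 = ([seed] : List Int).length := by
    unfold pvCountVal; rw [hvals0]
    simp only [List.length_cons, List.length_nil]
    decide
  have hyp2 : ∀ r : Int, 0 < r → pvCountVal dist0 r = 0 := by
    intro r hr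
    unfold pvCountVal; rw [hvals0]
    rw [List.count_eq_zero]
    intro h
    simp at h
    omega
  obtain ⟨ts, c1, c2, c3, c4, c5⟩ := pv_C neigh [seed] [] 0 dist0 hyp1 hyp2
  rw [← hP] at c1 c2 c3
  simp only [List.nil_append] at c1
  have hts : ts ≠ [] := by
    intro h; exact absurd (c5.mp h) (by simp)
  have htslen : 0 < ts.length := List.length_pos_iff.mpr hts
  have c2' : ∀ i : Nat, (pvCountVal P.2 (i : Int) : Int) = ts.getD i 0 := by
    intro i; have := c2 i; simpa using this
  -- counting facts about A's post-pass
  have hgetD : ∀ r : Int, (PySem.Dict.counter P.2.values).getD r 0 = (pvCountVal P.2 r : Int) := by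
    intro r
    exact PySem.Dict.getD_counter P.2.values r
  have hkeys : (PySem.Dict.counter P.2.values).keys = PySem.Set.ofList P.2.values := by
    exact PySem.Dict.keys_counter P.2.values
  have hmemval : ∀ r : Int, r ∈ P.2.values ↔ 0 < pvCountVal P.2 r := by
    intro r
    unfold pvCountVal
    exact (List.count_pos_iff).symm
  -- the max key of the counter is ts.length - 1
  have h0mem : (0 : Int) ∈ P.2.values := by
    rw [hmemval]
    have h := c2' 0
    simp only [Nat.cast_zero] at h
    have hpos := c4 _ (pv_getD_mem ts hts 0 htslen)
    omega
  have hKne : (PySem.Dict.counter P.2.values).keys ≠ [] := by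
    rw [hkeys]
    intro h
    have := (PySem.Set.mem_ofList P.2.values 0).mpr h0mem
    rw [h] at this
    cases this
  obtain ⟨m, hm⟩ : ∃ m, PySem.List.max? (PySem.Dict.counter P.2.values).keys (fun x => x) = some m := by
    cases hmx : PySem.List.max? (PySem.Dict.counter P.2.values).keys (fun x => x) with
    | none =>
      rw [PySem.List.max?_eq_none_iff] at hmx
      exact absurd hmx hKne
    | some m => exact ⟨m, rfl⟩
  have hmmem : m ∈ P.2.values := by
    have := PySem.List.max?_mem hm
    rw [hkeys] at this
    exact (PySem.Set.mem_ofList P.2.values m).mp this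
  have hmpos : 0 < pvCountVal P.2 m := (hmemval m).mp hmmem
  have hm0 : 0 ≤ m := by
    by_contra hneg
    push_neg at hneg
    have h3 := c3 m hneg
    unfold pvCountVal at h3 hmpos
    rw [hvals0] at h3
    have hz : ([(0 : Int)].count m) = 0 := by
      rw [List.count_eq_zero]
      intro hmm
      simp at hmm
      omega
    omega
  have hmlt : m < (ts.length : Int) := by
    by_contra h
    push_neg at h
    have hmn : m = ((m.toNat : Nat) : Int) := by omega
    have := c2' m.toNat
    rw [← hmn] at this
    rw [List.getD_eq_default] at this
    · omega
    · omega
  have hmge : (ts.length : Int) - 1 ≤ m := by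
    have hn : ts.length - 1 < ts.length := by omega
    have hmem := pv_getD_mem ts hts (ts.length - 1) hn
    have hpos := c4 _ hmem
    have hc := c2' (ts.length - 1)
    have : ((ts.length - 1 : Nat) : Int) ∈ P.2.values := by
      rw [hmemval]
      omega
    have hle := PySem.List.max?_isMax hm _ (by rw [hkeys]; exact (PySem.Set.mem_ofList _ _).mpr this)
    simp at hle
    omega
  have hmeq : m = (ts.length : Int) - 1 := by omega
  -- assemble
  simp only [hdicts, hm, hmeq]
  refine Prod.ext ?_ rfl
  show (PySem.List.pyRange 0 ((ts.length : Int) - 1 + 1) 1).map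
      (fun r => (PySem.Dict.counter P.2.values).getD r 0) = P.1
  rw [c1]
  rw [show ((ts.length : Int) - 1 + 1) = (ts.length : Int) by ring]
  rw [PySem.List.pyRange_one]
  rw [List.map_map]
  rw [show ((ts.length : Int) - 0).toNat = ts.length by omega]
  have : ∀ k ∈ List.range ts.length,
      ((fun r => (PySem.Dict.counter P.2.values).getD r 0) ∘ fun k : Nat => (0 : Int) + k) k
        = ts.getD k 0 := by
    intro k hk
    simp only [Function.comp_apply, zero_add]
    rw [hgetD, c2']
  rw [List.map_congr_left this]
  exact pv_getD_range ts
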